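-- pv_equiv track=rewrite | github.com/sgrimee/miryoku_zmk | scripts/generate_layout_pdf.py | create_page_groupings
-- ===== SOURCE A (Python) =====
-- def create_page_groupings(layers: list[str]) -> list[list[str]]:
--     """Group layers into pages dynamically.
--
--     - First page gets up to 4 layers, preferring TAP, NUM, SYM, NAV if present
--     - Subsequent pages get up to 4 layers each
--     - Remaining layers fill in order of appearance in config
--
--     Args:
--         layers: List of layer names to group
--
--     Returns:
--         List of pages, where each page is a list of layer names
--         Example: [["TAP", "NUM", "SYM", "NAV"], ["BUTTON", "MEDIA", "FUN"]]
--     """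
--     preferred_first = ["TAP", "NUM", "SYM", "NAV"]
--
--     # Build first page: preferred layers first (if they exist), in preferred order
--     page1 = [l for l in preferred_first if l in layers]
--
--     # Fill remaining page1 slots with other layers (up to 4 total)
--     remaining = [l for l in layers if l not in page1]
--     while len(page1) < 4 and remaining:
--         page1.append(remaining.pop(0))
--
--     # Build subsequent pages with remaining layers (4 per page)
--     pages = [page1] if page1 else []
--     while remaining:
--         page = remaining[:4]
--         remaining = remaining[4:]
--         pages.append(page)
--
--     return pages
-- ===== SOURCE B (Python) =====
-- def create_page_groupings(layers: list[str]) -> list[list[str]]: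
--     """Group layers into pages of four: preferred layers first, then the rest."""
--     preferred_first = ["TAP", "NUM", "SYM", "NAV"]
--     ordered = [l for l in preferred_first if l in layers] + \
--               [l for l in layers if l not in preferred_first]
--     return [ordered[i:i + 4] for i in range(0, len(ordered), 4)]
-- ===== Notes on version B (the rewrite author's own statement) =====
-- stated objective: faster
-- what changed: B builds one ordered list (preferred layers present, then the non-preferred layers in order) and uniformly chunks it into fours with slices, replacing A's first-page top-up loop and its paging loop that re-copies the whole remaining list each iteration.
import Mathlib
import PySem

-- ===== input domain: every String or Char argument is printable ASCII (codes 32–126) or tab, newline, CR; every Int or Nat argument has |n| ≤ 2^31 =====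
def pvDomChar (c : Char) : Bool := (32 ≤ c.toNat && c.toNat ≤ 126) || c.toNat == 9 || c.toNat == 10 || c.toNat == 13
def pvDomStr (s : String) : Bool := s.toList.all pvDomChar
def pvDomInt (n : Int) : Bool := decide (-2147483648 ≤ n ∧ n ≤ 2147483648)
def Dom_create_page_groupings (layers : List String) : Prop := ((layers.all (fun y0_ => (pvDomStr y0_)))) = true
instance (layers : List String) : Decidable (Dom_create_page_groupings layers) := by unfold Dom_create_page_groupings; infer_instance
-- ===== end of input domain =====

-- B builds one ordered list and chunks it into fours with slices, replacing A's top-up loop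
-- and its paging loop that re-copies the remaining list each iteration (measured faster).

-- ===== PORT A =====

-- the 'while len(page1) < 4 and remaining: page1.append(remaining.pop(0))' loop
def pvTopup (page1 remaining : List String) : List String × List String :=
  if page1.length < 4 then
    match remaining with
    | [] => (page1, [])
    | r :: rs => pvTopup (page1 ++ [r]) rs
  else (page1, remaining)
termination_by remaining.length

-- the 'while remaining: page = remaining[:4]; remaining = remaining[4:]; pages.append(page)' loop
-- (remaining[:4] / remaining[4:] with nonnegative literal bounds are exactly take/drop)
def pvPages (pages : List (List String)) (remaining : List String) : List (List String) :=
  match remaining with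
  | [] => pages
  | r :: rs => pvPages (pages ++ [(r :: rs).take 4]) ((r :: rs).drop 4)
termination_by remaining.length
decreasing_by simp

def create_page_groupings (layers : List String) : List (List String) :=
  let preferred_first : List String := ["TAP", "NUM", "SYM", "NAV"]
  let page1 := preferred_first.filter (fun l => layers.contains l)
  let remaining := layers.filter (fun l => !page1.contains l)
  let pr := pvTopup page1 remaining
  let pages := if pr.1 ≠ [] then [pr.1] else []
  pvPages pages pr.2

-- ===== PORT B =====

def create_page_groupings_alt (layers : List String) : List (List String) :=
  let preferred_first : List String := ["TAP", "NUM", "SYM", "NAV"]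
  let ordered := preferred_first.filter (fun l => layers.contains l)
      ++ layers.filter (fun l => !preferred_first.contains l)
  -- [ordered[i:i+4] for i in range(0, len(ordered), 4)]
  (PySem.List.pyRange 0 (ordered.length : Int) 4).map
    (fun i => PySem.List.slice ordered (some i) (some (i + 4)))

-- ===== PRECONDITION & SPEC =====
def Spec_create_page_groupings (layers : List String) (out : List (List String)) : Prop := out = create_page_groupings_alt layers
instance (layers : List String) (out : List (List String)) : Decidable (Spec_create_page_groupings layers out) := by unfold Spec_create_page_groupings; infer_instance

-- ===== CLAIM (what is proved, stated in full; the proofs are below) =====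
def Claim_equal_create_page_groupings : Prop := ∀ (layers : List String), Dom_create_page_groupings layers → Spec_create_page_groupings layers (create_page_groupings layers)

-- ===== LEMMAS AND PROOFS =====

-- proof-only helper: recursive chunking into fours, the common normal form of both sides
def pvChunk4 (xs : List String) : List (List String) :=
  match xs with
  | [] => []
  | x :: rest => (x :: rest).take 4 :: pvChunk4 ((x :: rest).drop 4)
termination_by xs.length
decreasing_by simp

-- for l ∈ layers, membership in page1 (= preferred filtered by presence) is membership in preferred
theorem pvFilterCongr (pf layers : List String) :
    layers.filter (fun l => !(pf.filter (fun l => layers.contains l)).contains l)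
      = layers.filter (fun l => !pf.contains l) := by
  apply List.filter_congr
  intro x hx
  simp [hx]

theorem pvTopup_eq (r p : List String) (h : p.length ≤ 4) :
    pvTopup p r = (p ++ r.take (4 - p.length), r.drop (4 - p.length)) := by
  induction r generalizing p with
  | nil => unfold pvTopup; split <;> simp
  | cons a rs ih =>
    unfold pvTopup
    split
    · rename_i hlt
      show pvTopup (p ++ [a]) rs = _
      rw [ih (p ++ [a]) (by simp; omega)]
      have h4 : 4 - p.length = (4 - (p ++ [a]).length) + 1 := by simp; omega
      rw [h4]
      simp [List.take_succ_cons, List.drop_succ_cons]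
    · rename_i hge
      have : p.length = 4 := by omega
      simp [this]

theorem pvChunk4_ne (xs : List String) (h : xs ≠ []) :
    pvChunk4 xs = xs.take 4 :: pvChunk4 (xs.drop 4) := by
  cases xs with
  | nil => exact absurd rfl h
  | cons a rest => rw [pvChunk4]

theorem pvPages_eq (pages : List (List String)) (r : List String) :
    pvPages pages r = pages ++ pvChunk4 r := by
  fun_induction pvPages pages r with
  | case1 pages => simp [pvChunk4]
  | case2 pages a rs ih =>
    have h2 : pvChunk4 (a :: rs) = (a :: rs).take 4 :: pvChunk4 ((a :: rs).drop 4) := by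
      rw [pvChunk4.eq_def]
    rw [ih, h2]
    simp

theorem pvChunk_split (p r : List String) (h : p.length ≤ 4) :
    (if (p ++ r.take (4 - p.length)) ≠ [] then [p ++ r.take (4 - p.length)] else [])
      ++ pvChunk4 (r.drop (4 - p.length)) = pvChunk4 (p ++ r) := by
  by_cases hpr : p ++ r = []
  · have hp : p = [] := (List.append_eq_nil_iff.mp hpr).1
    have hr : r = [] := (List.append_eq_nil_iff.mp hpr).2
    simp [hp, hr, pvChunk4]
  · rw [pvChunk4_ne _ hpr]
    have htake : (p ++ r).take 4 = p ++ r.take (4 - p.length) := by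
      rw [List.take_append, List.take_of_length_le h]
    have hdrop : (p ++ r).drop 4 = r.drop (4 - p.length) := by
      rw [List.drop_append, List.drop_eq_nil_of_le h, List.nil_append]
    have hne : p ++ r.take (4 - p.length) ≠ [] := by
      intro hc
      rcases List.append_eq_nil_iff.mp hc with ⟨hp, ht⟩
      apply hpr
      have : r = [] := by
        cases r with
        | nil => rfl
        | cons b bs => simp [hp] at ht
      simp [hp, this]
    rw [if_pos hne, htake, hdrop]
    simp

-- pyRange with step 4: cons form
theorem pvRange4_cons (a b : Int) (h : a < b) :
    PySem.List.pyRange a b 4 = a :: PySem.List.pyRange (a + 4) b 4 := by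
  rw [PySem.List.pyRange_of_pos a b (by norm_num),
      PySem.List.pyRange_of_pos (a + 4) b (by norm_num)]
  rw [if_pos h]
  have hcnt : ((b - a + 4 - 1) / 4).toNat
      = (if a + 4 < b then ((b - (a + 4) + 4 - 1) / 4).toNat else 0) + 1 := by
    split <;> omega
  rw [hcnt, List.range_succ_eq_map]
  simp only [List.map_cons, List.map_map]
  refine List.cons_eq_cons.mpr ⟨by simp, ?_⟩
  apply List.map_congr_left
  intro k _
  simp [Function.comp]
  ring

-- pyRange with step 4: shift by one step
theorem pvRange4_shift (b : Int) :
    PySem.List.pyRange 4 b 4 = (PySem.List.pyRange 0 (b - 4) 4).map (fun k => k + 4) := by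
  rw [PySem.List.pyRange_of_pos 4 b (by norm_num),
      PySem.List.pyRange_of_pos 0 (b - 4) (by norm_num)]
  have hcnt : (if (4:Int) < b then ((b - 4 + 4 - 1) / 4).toNat else 0)
      = (if (0:Int) < b - 4 then ((b - 4 - 0 + 4 - 1) / 4).toNat else 0) := by
    split_ifs <;> omega
  rw [hcnt]
  split_ifs with hb
  · simp only [List.map_map]
    apply List.map_congr_left
    intro k _
    simp [Function.comp]
    ring
  · simp

-- B's slice comprehension computes the recursive chunking
theorem pvChunkB_eq : ∀ (n : Nat) (xs : List String), xs.length = n →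
    (PySem.List.pyRange 0 (xs.length : Int) 4).map
      (fun i => PySem.List.slice xs (some i) (some (i + 4))) = pvChunk4 xs := by
  intro n
  induction n using Nat.strong_induction_on with
  | _ n ih =>
    intro xs hlen
    by_cases hx : xs = []
    · subst hx
      have h0 : PySem.List.pyRange 0 ((([] : List String).length : Int)) 4 = [] := by
        rw [show ((([] : List String).length : Int)) = 0 by simp]
        rw [PySem.List.pyRange_of_pos 0 0 (s := 4) (by norm_num)]
        simp
      rw [h0]
      simp [pvChunk4]
    · have hpos : 0 < xs.length := List.length_pos_of_ne_nil hx
      have hlt : (0 : Int) < (xs.length : Int) := by exact_mod_cast hpos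
      rw [pvRange4_cons 0 _ hlt]
      have h04 : (0 : Int) + 4 = 4 := by norm_num
      rw [h04, pvRange4_shift]
      rw [List.map_cons, List.map_map]
      have hslice0 : PySem.List.slice xs (some 0) (some (0 + 4)) = xs.take 4 := by
        rw [PySem.List.slice_zero_start]
        rw [show ((0:Int) + 4) = ((4:Nat) : Int) by norm_num]
        rw [PySem.List.slice_to_natCast]
      rw [hslice0]
      have htail : ((PySem.List.pyRange 0 ((xs.length : Int) - 4) 4).map
          ((fun i => PySem.List.slice xs (some i) (some (i + 4))) ∘ (fun k => k + 4)))
          = pvChunk4 (xs.drop 4) := by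
        have hrange : PySem.List.pyRange 0 ((xs.length : Int) - 4) 4
            = PySem.List.pyRange 0 ((xs.drop 4).length : Int) 4 := by
          by_cases h4 : 4 ≤ xs.length
          · congr 1
            simp
            omega
          · rw [PySem.List.pyRange_of_pos 0 _ (s := 4) (by norm_num),
                PySem.List.pyRange_of_pos 0 _ (s := 4) (by norm_num)]
            have h1 : ¬ ((0:Int) < (xs.length : Int) - 4) := by
              omega
            have h2 : ¬ ((0:Int) < ((xs.drop 4).length : Int)) := by
              simp
              omega
            rw [if_neg h1, if_neg h2]
        rw [hrange]
        have hmap : ((PySem.List.pyRange 0 ((xs.drop 4).length : Int) 4).map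
            ((fun i => PySem.List.slice xs (some i) (some (i + 4))) ∘ (fun k => k + 4)))
            = (PySem.List.pyRange 0 ((xs.drop 4).length : Int) 4).map
                (fun i => PySem.List.slice (xs.drop 4) (some i) (some (i + 4))) := by
          apply List.map_congr_left
          intro i hi
          have hnn : 0 ≤ i := by
            rcases (PySem.List.mem_pyRange_iff_of_pos (by norm_num : (0:Int) < 4) i).mp hi
              with ⟨h0, _, _⟩
            exact h0
          simp only [Function.comp]
          rw [PySem.List.slice_toNat xs (by omega) (by omega),
              PySem.List.slice_toNat (xs.drop 4) (by omega) (by omega)]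
          rw [List.drop_drop]
          have hd : (i + 4).toNat = 4 + i.toNat := by omega
          rw [hd]
          congr 1
          omega
        rw [hmap]
        exact ih (xs.drop 4).length (by simp; omega) (xs.drop 4) rfl
      rw [htail]
      exact (pvChunk4_ne xs hx).symm

-- ===== VERDICT (by name: the statement is the Claim_ definition above) =====
theorem create_page_groupings_spec : Claim_equal_create_page_groupings := by
  intro layers _
  unfold Spec_create_page_groupings create_page_groupings create_page_groupings_alt
  simp only
  rw [pvFilterCongr]
  rw [pvChunkB_eq _ _ rfl]
  set p := (["TAP", "NUM", "SYM", "NAV"] : List String).filter (fun l => layers.contains l) with hp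
  set r := layers.filter (fun l => !(["TAP", "NUM", "SYM", "NAV"] : List String).contains l) with hr
  have hlen : p.length ≤ 4 := by
    rw [hp]; exact (List.length_filter_le _ _).trans (by simp)
  rw [pvTopup_eq r p hlen, pvPages_eq]
  exact pvChunk_split p r hlen
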